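-- pv_equiv track=rewrite | github.com/raeez/chiral-bar-cobar | compute/lib/virasoro_bar.py | bar_dim_table
-- ===== SOURCE A (Python) =====
-- from math import factorial
-- from typing import Dict, List, Tuple
--
-- def partitions_geq2(h: int) -> int:
--     """Number of partitions of h into parts >= 2.
--
--     p_{>=2}(h) = p(h) - p(h-1) where p = unrestricted partition function.
--
--     Ground truth: comp:virasoro-vacuum.
--     Values: h=2:1, 3:1, 4:2, 5:2, 6:4, 7:4, 8:7, 9:8, 10:12, 11:14, 12:21
--     """
--     if h < 0:
--         return 0
--     if h == 0:
--         return 1  # empty partition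
--     if h == 1:
--         return 0  # no partition of 1 into parts >= 2
--
--     dp = [0] * (h + 1)
--     dp[0] = 1
--     for part in range(2, h + 1):
--         for j in range(part, h + 1):
--             dp[j] += dp[j - part]
--     return dp[h]
--
-- def os_top_dim(n: int) -> int:
--     """Dimension of top-degree OS algebra on n points.
--
--     dim Omega^{n-1}(Conf_n(C)) = (n-1)!
--
--     Ground truth: comp:poincare-config.
--     """
--     if n <= 0:
--         return 0
--     return factorial(n - 1)
--
-- def bar_chain_dim(n: int, h: int) -> int:
--     """Dimension of B^n_h(Vir_c): bar degree n, conformal weight h.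
--
--     dim B^n_h = (sum_{a1+...+an=h, ai>=2} prod p_{>=2}(ai)) * (n-1)!
--
--     Ground truth: comp:virasoro-dim-table.
--     """
--     if n <= 0 or h < 2 * n:
--         return 0
--
--     form_dim = os_top_dim(n)
--     if form_dim == 0:
--         return 0
--
--     aug_dims = {w: partitions_geq2(w) for w in range(2, h - 2 * (n - 1) + 1)}
--     tensor_count = _tensor_product_dim(n, h, aug_dims)
--     return tensor_count * form_dim
--
-- def _tensor_product_dim(n: int, h: int, aug_dims: Dict[int, int]) -> int:
--     """Sum over compositions h = a1 + ... + an (ai >= 2) of prod p_{>=2}(ai)."""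
--     if n == 1:
--         return aug_dims.get(h, partitions_geq2(h))
--
--     total = 0
--     for a in range(2, h - 2 * (n - 1) + 1):
--         d_a = aug_dims.get(a, partitions_geq2(a))
--         if d_a == 0:
--             continue
--         rest = _tensor_product_dim(n - 1, h - a, aug_dims)
--         total += d_a * rest
--     return total
--
-- def bar_dim_table(max_n: int, max_h: int) -> Dict[Tuple[int, int], int]:
--     """Full dimension table for B^n_h(Vir_c).
--
--     Ground truth: comp:virasoro-dim-table.
--     """
--     table = {}
--     for n in range(1, max_n + 1):
--         for h in range(2 * n, max_h + 1):
--             d = bar_chain_dim(n, h)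
--             if d > 0:
--                 table[(n, h)] = d
--     return table
-- ===== SOURCE B (Python) =====
-- def bar_dim_table(max_n, max_h):
--     """Full dimension table for B^n_h(Vir_c), by bottom-up DP.
--
--     p[w] = number of partitions of w into parts >= 2 (one sieve, computed once);
--     f[h] = sum over compositions of h into n parts >= 2 of the product of p-values,
--     obtained by repeated convolution with p; the entry is f[h] * (n-1)!.
--     Rows with 2*n > max_h are empty, so the loop stops at min(max_n, max_h // 2).
--     """
--     table = {}
--     N = min(max_n, max_h // 2)
--     if N < 1:
--         return table
--     H = max_h
--     p = [0] * (H + 1)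
--     p[0] = 1
--     for part in range(2, H + 1):
--         for j in range(part, H + 1):
--             p[j] += p[j - part]
--     f = [p[h] if h >= 2 else 0 for h in range(H + 1)]
--     fact = 1
--     for n in range(1, N + 1):
--         if n > 1:
--             fact *= n - 1
--             f = [sum(p[a] * f[h - a] for a in range(2, h + 1)) for h in range(H + 1)]
--         for h in range(2 * n, max_h + 1):
--             d = f[h] * fact
--             if d > 0:
--                 table[(n, h)] = d
--     return table
-- ===== Notes on version B (the rewrite author's own statement) =====
-- stated objective: faster
-- what changed: Replaces the per-entry exponential recursion over compositions (with a fresh partition sieve per weight) by one partition sieve plus a bottom-up convolution DP f[n] = p * f[n-1] with a running factorial, stopping at min(max_n, max_h//2); intended as faster: a timing run measured B 218x faster at the largest size both finished, and A timed out where B returned (unconfirmed in a timing run beyond that).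
import Mathlib
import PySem

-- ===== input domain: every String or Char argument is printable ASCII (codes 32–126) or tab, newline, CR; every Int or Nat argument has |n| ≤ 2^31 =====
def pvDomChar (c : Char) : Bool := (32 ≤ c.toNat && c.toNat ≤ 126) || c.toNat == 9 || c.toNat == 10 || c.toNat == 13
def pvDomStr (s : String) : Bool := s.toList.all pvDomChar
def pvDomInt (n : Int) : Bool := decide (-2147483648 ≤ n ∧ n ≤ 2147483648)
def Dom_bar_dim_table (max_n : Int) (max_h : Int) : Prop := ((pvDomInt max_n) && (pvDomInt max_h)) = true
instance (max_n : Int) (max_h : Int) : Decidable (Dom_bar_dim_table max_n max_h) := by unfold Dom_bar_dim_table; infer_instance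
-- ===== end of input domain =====

-- B replaces A's per-entry exponential recursion over compositions by one partition sieve plus a
-- bottom-up convolution DP with a running factorial (objective: faster; a timing run measured
-- B 218x faster at the largest size both finished, A timing out beyond that).
-- Both Pythons return a dict keyed by the always-fresh pairs (n, h); it is rendered here, in
-- insertion order, as a list of (n, h, d) triples (fresh keys make dict insertion = append).

-- ===== PORT A =====

-- partitions_geq2(h): guard chain, then the two nested sieve loops on the list dp
def partitions_geq2 (h : Int) : Int :=
  if h < 0 then 0
  else if h = 0 then 1
  else if h = 1 then 0
  else
    let dp : List Int := (List.replicate (h + 1).toNat (0 : Int)).set 0 1   -- dp = [0]*(h+1); dp[0] = 1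
    let dp := (PySem.List.pyRange 2 (h + 1)).foldl (fun dp part =>
      (PySem.List.pyRange part (h + 1)).foldl (fun dp j =>
        PySem.List.pySetD dp j (PySem.List.pyGetD dp j 0 + PySem.List.pyGetD dp (j - part) 0)) dp) dp
    PySem.List.pyGetD dp h 0

-- os_top_dim(n); math.factorial ported as Nat.factorial
def os_top_dim (n : Int) : Int :=
  if n ≤ 0 then 0 else (Nat.factorial (n - 1).toNat : Int)

-- _tensor_product_dim(n, h, aug_dims); recursion made total by a fuel parameter:
-- every call site passes fuel = n.toNat and n ≥ 1 there, so the fuel-0 branch is never reached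
def tensor_product_dim (fuel : Nat) (n : Int) (h : Int) (aug_dims : PySem.Dict Int Int) : Int :=
  match fuel with
  | 0 => 0
  | fuel + 1 =>
    if n = 1 then aug_dims.getD h (partitions_geq2 h)
    else (PySem.List.pyRange 2 (h - 2 * (n - 1) + 1)).foldl (fun total a =>
      let d_a := aug_dims.getD a (partitions_geq2 a)
      if d_a = 0 then total
      else total + d_a * tensor_product_dim fuel (n - 1) (h - a) aug_dims) 0

def bar_chain_dim (n : Int) (h : Int) : Int :=
  if n ≤ 0 ∨ h < 2 * n then 0
  else
    let form_dim := os_top_dim n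
    if form_dim = 0 then 0
    else
      let aug_dims : PySem.Dict Int Int :=
        (PySem.List.pyRange 2 (h - 2 * (n - 1) + 1)).foldl
          (fun d w => d.insert w (partitions_geq2 w)) PySem.Dict.empty
      tensor_product_dim n.toNat n h aug_dims * form_dim

def bar_dim_table (max_n : Int) (max_h : Int) : List (Int × Int × Int) :=
  (PySem.List.pyRange 1 (max_n + 1)).foldl (fun table n =>
    (PySem.List.pyRange (2 * n) (max_h + 1)).foldl (fun table h =>
      let d := bar_chain_dim n h
      if d > 0 then table ++ [(n, h, d)] else table) table) []

-- ===== PORT B =====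

def bar_dim_table_alt (max_n : Int) (max_h : Int) : List (Int × Int × Int) :=
  let table : List (Int × Int × Int) := []
  let N : Int := min max_n (PySem.Int.floordiv max_h 2)
  if N < 1 then table
  else
    let H : Int := max_h
    let p : List Int := (List.replicate (H + 1).toNat (0 : Int)).set 0 1   -- p = [0]*(H+1); p[0] = 1
    let p := (PySem.List.pyRange 2 (H + 1)).foldl (fun p part =>
      (PySem.List.pyRange part (H + 1)).foldl (fun p j =>
        PySem.List.pySetD p j (PySem.List.pyGetD p j 0 + PySem.List.pyGetD p (j - part) 0)) p)
      p
    -- f = [p[h] if h >= 2 else 0 for h in range(H+1)]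
    let f : List Int := (PySem.List.pyRange 0 (H + 1)).map
      (fun h => if 2 ≤ h then PySem.List.pyGetD p h 0 else 0)
    let res := (PySem.List.pyRange 1 (N + 1)).foldl (fun st n =>
      let (table, f, fact) := st
      let (f, fact) :=
        if 1 < n then
          ((PySem.List.pyRange 0 (H + 1)).map (fun h =>
              ((PySem.List.pyRange 2 (h + 1)).map (fun a =>
                PySem.List.pyGetD p a 0 * PySem.List.pyGetD f (h - a) 0)).sum),
           fact * (n - 1))
        else (f, fact)
      let table := (PySem.List.pyRange (2 * n) (max_h + 1)).foldl (fun table h =>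
        let d := PySem.List.pyGetD f h 0 * fact
        if d > 0 then table ++ [(n, h, d)] else table) table
      (table, f, fact)) (table, f, (1 : Int))
    res.1

-- ===== PRECONDITION & SPEC =====
def Spec_bar_dim_table (max_n : Int) (max_h : Int) (out : List (Int × Int × Int)) : Prop := out = bar_dim_table_alt max_n max_h
instance (max_n : Int) (max_h : Int) (out : List (Int × Int × Int)) : Decidable (Spec_bar_dim_table max_n max_h out) := by unfold Spec_bar_dim_table; infer_instance

-- ===== CLAIM (what is proved, stated in full; the proofs are below) =====
def Claim_equal_bar_dim_table : Prop := ∀ (max_n : Int) (max_h : Int), Dom_bar_dim_table max_n max_h → Spec_bar_dim_table max_n max_h (bar_dim_table max_n max_h)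

-- ===== LEMMAS AND PROOFS =====

-- The sieve both Pythons run: dp = [0]*(m+1); dp[0]=1; for part in 2..m: for j in part..m: dp[j]+=dp[j-part]
def sieve (m : Int) : List Int :=
  let dp : List Int := (List.replicate (m + 1).toNat (0 : Int)).set 0 1
  (PySem.List.pyRange 2 (m + 1)).foldl (fun dp part =>
    (PySem.List.pyRange part (m + 1)).foldl (fun dp j =>
      PySem.List.pySetD dp j (PySem.List.pyGetD dp j 0 + PySem.List.pyGetD dp (j - part) 0)) dp) dp

-- body of the inner sieve loop
def sbody (part : Int) (dp : List Int) (j : Int) : List Int :=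
  PySem.List.pySetD dp j (PySem.List.pyGetD dp j 0 + PySem.List.pyGetD dp (j - part) 0)

-- small get/set facts
lemma get_set_ne (xs : List Int) (i j v : Int) (hi : 0 ≤ i) (hj : 0 ≤ j) (hne : j ≠ i) :
    PySem.List.pyGetD (PySem.List.pySetD xs i v) j 0 = PySem.List.pyGetD xs j 0 := by
  rw [PySem.List.pySetD_of_nonneg xs v hi, PySem.List.pyGetD_of_nonneg _ _ hj,
      PySem.List.pyGetD_of_nonneg _ _ hj, List.getD_eq_getElem?_getD, List.getD_eq_getElem?_getD,
      List.getElem?_set_ne (by omega)]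

lemma get_set_self (xs : List Int) (i v : Int) (hi : 0 ≤ i) (hlen : i < (xs.length : Int)) :
    PySem.List.pyGetD (PySem.List.pySetD xs i v) i 0 = v := by
  rw [PySem.List.pySetD_of_nonneg xs v hi, PySem.List.pyGetD_of_nonneg _ _ hi,
      List.getD_eq_getElem?_getD, List.getElem?_set_self (by omega)]
  rfl

lemma get_dp0 (m j : Int) (hj : 0 ≤ j) (hm : 0 ≤ m) :
    PySem.List.pyGetD ((List.replicate (m + 1).toNat (0 : Int)).set 0 1) j 0
      = if j = 0 then 1 else 0 := by
  rw [PySem.List.pyGetD_of_nonneg _ _ hj, List.getD_eq_getElem?_getD]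
  by_cases hj0 : j = 0
  · subst hj0
    rw [if_pos rfl, show (0 : Int).toNat = 0 from rfl,
        List.getElem?_set_self (by simp; omega)]
    rfl
  · rw [if_neg hj0, List.getElem?_set_ne (by omega), List.getElem?_replicate]
    split <;> rfl

lemma len_foldl_sbody (part : Int) (l : List Int) (dp : List Int) :
    (l.foldl (sbody part) dp).length = dp.length := by
  induction l generalizing dp with
  | nil => rfl
  | cons j t ih => simp [List.foldl_cons, ih, sbody, PySem.List.length_pySetD]

-- writes at indices > K do not change reads at indices ≤ K
lemma get_foldl_sbody_high (part K : Int) (l : List Int) (hl : ∀ j ∈ l, K < j)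
    (dp : List Int) (i : Int) (hi : 0 ≤ i) (hiK : i ≤ K) :
    PySem.List.pyGetD (l.foldl (sbody part) dp) i 0 = PySem.List.pyGetD dp i 0 := by
  induction l generalizing dp with
  | nil => rfl
  | cons j t ih =>
    have hj := hl j (by simp)
    rw [List.foldl_cons, ih (fun x hx => hl x (by simp [hx]))]
    exact get_set_ne dp j i _ (by omega) hi (by omega)

def agreeUpTo (K : Int) (xs ys : List Int) : Prop :=
  ∀ j : Int, 0 ≤ j → j ≤ K → PySem.List.pyGetD xs j 0 = PySem.List.pyGetD ys j 0

-- running the same inner pass on two lists that agree up to K keeps them agreeing up to K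
lemma parallel_sbody (part K : Int) (hpart : 2 ≤ part) (l : List Int) (hl : ∀ j ∈ l, part ≤ j)
    (xs ys : List Int) (hx : K < (xs.length : Int)) (hy : K < (ys.length : Int))
    (hagree : agreeUpTo K xs ys) :
    agreeUpTo K (l.foldl (sbody part) xs) (l.foldl (sbody part) ys) := by
  induction l generalizing xs ys with
  | nil => exact hagree
  | cons j t ih =>
    have hj := hl j (by simp)
    rw [List.foldl_cons, List.foldl_cons]
    apply ih (fun x hx => hl x (by simp [hx]))
    · rw [sbody, PySem.List.length_pySetD]; exact hx
    · rw [sbody, PySem.List.length_pySetD]; exact hy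
    · by_cases hjK : j ≤ K
      · have hv : PySem.List.pyGetD xs j 0 + PySem.List.pyGetD xs (j - part) 0
            = PySem.List.pyGetD ys j 0 + PySem.List.pyGetD ys (j - part) 0 := by
          rw [hagree j (by omega) hjK, hagree (j - part) (by omega) (by omega)]
        intro i hi hiK
        by_cases hij : i = j
        · subst hij
          rw [sbody, get_set_self xs i _ (by omega) (by omega),
              sbody, hv, get_set_self ys i _ (by omega) (by omega)]
        · rw [sbody, get_set_ne xs j i _ (by omega) hi hij,
              sbody, get_set_ne ys j i _ (by omega) hi hij]
          exact hagree i hi hiK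
      · intro i hi hiK
        rw [sbody, get_set_ne xs j i _ (by omega) hi (by omega),
            sbody, get_set_ne ys j i _ (by omega) hi (by omega)]
        exact hagree i hi hiK

-- whole-pass (outer-iteration) version over [part, bound)
lemma parallel_pass (part K m m' : Int) (hpart : 2 ≤ part) (hK : 0 ≤ K) (hKm : K ≤ m) (hmm' : m ≤ m')
    (xs ys : List Int) (hx : K < (xs.length : Int)) (hy : K < (ys.length : Int))
    (hagree : agreeUpTo K xs ys) :
    agreeUpTo K ((PySem.List.pyRange part (m + 1)).foldl (sbody part) xs)
               ((PySem.List.pyRange part (m' + 1)).foldl (sbody part) ys) := by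
  intro i hi hiK
  by_cases hcase : part ≤ m + 1
  · rw [PySem.List.pyRange_one_append part (m + 1) (m' + 1) hcase (by omega), List.foldl_append,
        get_foldl_sbody_high part K (PySem.List.pyRange (m + 1) (m' + 1))
          (fun j hj => by rw [PySem.List.mem_pyRange_one] at hj; omega)
          ((PySem.List.pyRange part (m + 1)).foldl (sbody part) ys) i hi hiK]
    exact parallel_sbody part K hpart _
      (fun j hj => by rw [PySem.List.mem_pyRange_one] at hj; omega) xs ys hx hy hagree i hi hiK
  · rw [PySem.List.pyRange_one_eq_nil (a := part) (b := m + 1) (by omega),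
        get_foldl_sbody_high part K (PySem.List.pyRange part (m' + 1))
          (fun j hj => by rw [PySem.List.mem_pyRange_one] at hj; omega) ys i hi hiK]
    exact hagree i hi hiK

lemma sieve_eq (m : Int) :
    sieve m = (PySem.List.pyRange 2 (m + 1)).foldl
      (fun dp part => (PySem.List.pyRange part (m + 1)).foldl (sbody part) dp)
      ((List.replicate (m + 1).toNat (0 : Int)).set 0 1) := rfl

-- outer iterations whose part exceeds K do not change reads at indices ≤ K
lemma get_foldl_outer_high (K m : Int) (l : List Int) (hl : ∀ part ∈ l, K < part)
    (dp : List Int) (i : Int) (hi : 0 ≤ i) (hiK : i ≤ K) :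
    PySem.List.pyGetD
      (l.foldl (fun dp part => (PySem.List.pyRange part (m + 1)).foldl (sbody part) dp) dp) i 0
      = PySem.List.pyGetD dp i 0 := by
  induction l generalizing dp with
  | nil => rfl
  | cons part t ih =>
    have hp := hl part (by simp)
    rw [List.foldl_cons, ih (fun x hx => hl x (by simp [hx]))]
    exact get_foldl_sbody_high part K _
      (fun j hj => by rw [PySem.List.mem_pyRange_one] at hj; omega) dp i hi hiK

lemma parallel_outer (K m m' : Int) (hK : 0 ≤ K) (hKm : K ≤ m) (hmm' : m ≤ m')
    (l : List Int) (hl : ∀ part ∈ l, 2 ≤ part) (xs ys : List Int)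
    (hx : xs.length = (m + 1).toNat) (hy : ys.length = (m' + 1).toNat)
    (hagree : agreeUpTo K xs ys) :
    agreeUpTo K
      (l.foldl (fun dp part => (PySem.List.pyRange part (m + 1)).foldl (sbody part) dp) xs)
      (l.foldl (fun dp part => (PySem.List.pyRange part (m' + 1)).foldl (sbody part) dp) ys) := by
  induction l generalizing xs ys with
  | nil => exact hagree
  | cons part t ih =>
    have hp := hl part (by simp)
    rw [List.foldl_cons, List.foldl_cons]
    apply ih (fun x hx => hl x (by simp [hx]))
    · rw [len_foldl_sbody, hx]
    · rw [len_foldl_sbody, hy]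
    · exact parallel_pass part K m m' hp hK hKm hmm' xs ys (by omega) (by omega) hagree

-- the two sieves agree below min(m, m')
lemma sieve_agree (K m m' : Int) (hK : 0 ≤ K) (hKm : K ≤ m) (hmm' : m ≤ m') :
    agreeUpTo K (sieve m) (sieve m') := by
  have hinit : agreeUpTo K ((List.replicate (m + 1).toNat (0 : Int)).set 0 1)
      ((List.replicate (m' + 1).toNat (0 : Int)).set 0 1) := by
    intro j hj hjK
    rw [get_dp0 m j hj (by omega), get_dp0 m' j hj (by omega)]
  rw [sieve_eq, sieve_eq]
  by_cases hm1 : 1 ≤ m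
  · intro i hi hiK
    rw [PySem.List.pyRange_one_append 2 (m + 1) (m' + 1) (by omega) (by omega), List.foldl_append,
        get_foldl_outer_high K m' (PySem.List.pyRange (m + 1) (m' + 1))
          (fun part hp => by rw [PySem.List.mem_pyRange_one] at hp; omega) _ i hi hiK]
    exact parallel_outer K m m' hK hKm hmm' _
      (fun part hp => by rw [PySem.List.mem_pyRange_one] at hp; omega) _ _
      (by simp) (by simp) hinit i hi hiK
  · intro i hi hiK
    rw [PySem.List.pyRange_one_eq_nil (a := 2) (b := m + 1) (by omega), List.foldl_nil,
        get_foldl_outer_high K m' (PySem.List.pyRange 2 (m' + 1))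
          (fun part hp => by rw [PySem.List.mem_pyRange_one] at hp; omega) _ i hi hiK]
    exact hinit i hi hiK

lemma sieve_low (m j : Int) (hj : 0 ≤ j) (hj1 : j ≤ 1) (hm : 0 ≤ m) :
    PySem.List.pyGetD (sieve m) j 0 = if j = 0 then 1 else 0 := by
  rw [sieve_eq,
      get_foldl_outer_high 1 m (PySem.List.pyRange 2 (m + 1))
        (fun part hp => by rw [PySem.List.mem_pyRange_one] at hp; omega) _ j hj hj1]
  exact get_dp0 m j hj hm

lemma partitions_eq_sieve (h : Int) (h2 : 2 ≤ h) :
    partitions_geq2 h = PySem.List.pyGetD (sieve h) h 0 := by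
  rw [partitions_geq2, if_neg (by omega), if_neg (by omega), if_neg (by omega)]
  rfl

-- value of the H-bounded sieve at any 0 ≤ j ≤ H
lemma sieve_val (H j : Int) (hj : 0 ≤ j) (hH : j ≤ H) :
    PySem.List.pyGetD (sieve H) j 0 = partitions_geq2 j := by
  by_cases h2 : 2 ≤ j
  · rw [partitions_eq_sieve j h2]
    exact ((sieve_agree j j H hj le_rfl hH) j hj le_rfl).symm
  · rw [sieve_low H j hj (by omega) (by omega)]
    interval_cases j <;> rfl

-- ===== A-side characterisation =====

-- pure model of _tensor_product_dim
def Tm : Nat → Int → Int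
  | 0, _ => 0
  | n + 1, h =>
    if n = 0 then partitions_geq2 h
    else ((PySem.List.pyRange 2 (h - 2 * (n : Int) + 1)).map
      (fun a => partitions_geq2 a * Tm n (h - a))).sum

lemma aug_ok (l : List Int) (d : PySem.Dict Int Int)
    (hd : ∀ a : Int, d.getD a (partitions_geq2 a) = partitions_geq2 a) (a : Int) :
    ((l.foldl (fun d w => d.insert w (partitions_geq2 w)) d)).getD a (partitions_geq2 a)
      = partitions_geq2 a := by
  induction l generalizing d with
  | nil => exact hd a
  | cons w t ih =>
    rw [List.foldl_cons]
    apply ih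
    intro b
    rw [PySem.Dict.getD_insert]
    split
    · next hb => rw [hb]
    · exact hd b

lemma tensor_eq_Tm (fuel : Nat) (n h : Int) (aug : PySem.Dict Int Int)
    (haug : ∀ a : Int, aug.getD a (partitions_geq2 a) = partitions_geq2 a)
    (hn : 1 ≤ n) (hfuel : n.toNat ≤ fuel) :
    tensor_product_dim fuel n h aug = Tm n.toNat h := by
  induction fuel generalizing n h with
  | zero => omega
  | succ f ih =>
    rw [tensor_product_dim]
    by_cases h1 : n = 1
    · subst h1
      rw [if_pos rfl, haug]
      rfl
    · rw [if_neg h1]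
      have hcongr : ∀ (total : Int), ∀ a ∈ PySem.List.pyRange 2 (h - 2 * (n - 1) + 1),
          (fun total a =>
            let d_a := aug.getD a (partitions_geq2 a)
            if d_a = 0 then total
            else total + d_a * tensor_product_dim f (n - 1) (h - a) aug) total a
          = total + partitions_geq2 a * Tm (n - 1).toNat (h - a) := by
        intro total a _
        simp only [haug a]
        rw [ih (n - 1) (h - a) (by omega) (by omega)]
        by_cases hz : partitions_geq2 a = 0
        · rw [if_pos hz, hz, zero_mul, add_zero]
        · rw [if_neg hz]
      rw [PySem.List.foldl_congr_mem _ _ _ _ hcongr, PySem.List.foldl_add, zero_add]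
      obtain ⟨k, hk1, hk2, hk3⟩ : ∃ k : Nat, n.toNat = k + 1 ∧ (n - 1).toNat = k ∧ ((k : Nat) : Int) = n - 1 := by
        refine ⟨(n - 1).toNat, by omega, rfl, by omega⟩
      rw [hk1, hk2]
      show _ = Tm (k + 1) h
      rw [Tm, if_neg (by omega), hk3]

lemma bar_chain_eq (n h : Int) (hn : 1 ≤ n) (hh : 2 * n ≤ h) :
    bar_chain_dim n h = Tm n.toNat h * (Nat.factorial (n - 1).toNat : Int) := by
  rw [bar_chain_dim, if_neg (by omega)]
  simp only [os_top_dim, if_neg (show ¬ n ≤ 0 by omega)]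
  rw [if_neg (by exact_mod_cast Nat.factorial_ne_zero (n - 1).toNat),
      tensor_eq_Tm n.toNat n h _
        (aug_ok _ _ (fun a => PySem.Dict.getD_empty a _)) hn le_rfl]

-- ===== B-side characterisation =====

def convB (H : Int) (f : List Int) : List Int :=
  (PySem.List.pyRange 0 (H + 1)).map (fun h =>
    ((PySem.List.pyRange 2 (h + 1)).map (fun a =>
      PySem.List.pyGetD (sieve H) a 0 * PySem.List.pyGetD f (h - a) 0)).sum)

def fB (H : Int) : Nat → List Int
  | 0 => (PySem.List.pyRange 0 (H + 1)).map
      (fun h => if 2 ≤ h then PySem.List.pyGetD (sieve H) h 0 else 0)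
  | n + 1 => convB H (fB H n)

lemma fB_val (H : Int) (hH : 0 ≤ H) (n : Nat) : ∀ (h : Int), 0 ≤ h → h ≤ H →
    PySem.List.pyGetD (fB H n) h 0
      = if 2 * ((n : Int) + 1) ≤ h then Tm (n + 1) h else 0 := by
  induction n with
  | zero =>
    intro h h0 hHh
    rw [fB, PySem.List.pyGetD_map_pyRange_of_nonneg _ (H + 1) h 0 h0 (by omega)]
    by_cases h2 : 2 ≤ h
    · rw [if_pos h2, if_pos (by push_cast; omega), sieve_val H h h0 hHh]
      rfl
    · rw [if_neg h2, if_neg (by push_cast; omega)]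
  | succ n ih =>
    intro h h0 hHh
    rw [fB, convB, PySem.List.pyGetD_map_pyRange_of_nonneg _ (H + 1) h 0 h0 (by omega)]
    have hterm : ∀ a ∈ PySem.List.pyRange 2 (h + 1),
        PySem.List.pyGetD (sieve H) a 0 * PySem.List.pyGetD (fB H n) (h - a) 0
        = partitions_geq2 a * (if 2 * ((n : Int) + 1) ≤ h - a then Tm (n + 1) (h - a) else 0) := by
      intro a ha
      rw [PySem.List.mem_pyRange_one] at ha
      rw [sieve_val H a (by omega) (by omega), ih (h - a) (by omega) (by omega)]
    rw [List.map_congr_left hterm]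
    by_cases hbig : 2 * (((n : Int) + 1) + 1) ≤ h
    · rw [if_pos (by push_cast; omega),
          PySem.List.pyRange_one_append 2 (h - 2 * ((n : Int) + 1) + 1) (h + 1)
            (by omega) (by omega),
          List.map_append, List.sum_append]
      have hfirst : ∀ a ∈ PySem.List.pyRange 2 (h - 2 * ((n : Int) + 1) + 1),
          partitions_geq2 a * (if 2 * ((n : Int) + 1) ≤ h - a then Tm (n + 1) (h - a) else 0)
          = partitions_geq2 a * Tm (n + 1) (h - a) := by
        intro a ha; rw [PySem.List.mem_pyRange_one] at ha; rw [if_pos (by omega)]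
      have hsecond : ∀ a ∈ PySem.List.pyRange (h - 2 * ((n : Int) + 1) + 1) (h + 1),
          partitions_geq2 a * (if 2 * ((n : Int) + 1) ≤ h - a then Tm (n + 1) (h - a) else 0)
          = (0 : Int) := by
        intro a ha; rw [PySem.List.mem_pyRange_one] at ha
        rw [if_neg (by omega), mul_zero]
      rw [List.map_congr_left hfirst, List.map_congr_left hsecond,
          PySem.List.sum_map_const_int, mul_zero, add_zero]
      show _ = Tm (n + 1 + 1) h
      rw [Tm, if_neg (by omega)]
      push_cast
      ring_nf
    · rw [if_neg (by push_cast; omega)]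
      have hall : ∀ a ∈ PySem.List.pyRange 2 (h + 1),
          partitions_geq2 a * (if 2 * ((n : Int) + 1) ≤ h - a then Tm (n + 1) (h - a) else 0)
          = (0 : Int) := by
        intro a ha; rw [PySem.List.mem_pyRange_one] at ha
        rw [if_neg (by omega), mul_zero]
      rw [List.map_congr_left hall, PySem.List.sum_map_const_int, mul_zero]

-- ===== main fold equality =====

lemma main_fold (max_h : Int) (hH : (0 : Int) ≤ max_h) (N : Nat) :
    (PySem.List.pyRange 1 ((N : Int) + 1)).foldl (fun st n =>
      let (table, f, fact) := st
      let (f, fact) :=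
        if 1 < n then
          ((PySem.List.pyRange 0 ((max_h) + 1)).map (fun h =>
              ((PySem.List.pyRange 2 (h + 1)).map (fun a =>
                PySem.List.pyGetD (sieve (max_h)) a 0 * PySem.List.pyGetD f (h - a) 0)).sum),
           fact * (n - 1))
        else (f, fact)
      let table := (PySem.List.pyRange (2 * n) (max_h + 1)).foldl (fun table h =>
        let d := PySem.List.pyGetD f h 0 * fact
        if d > 0 then table ++ [(n, h, d)] else table) table
      (table, f, fact)) (([] : List (Int × Int × Int)), fB (max_h) 0, (1 : Int))
    = ((PySem.List.pyRange 1 ((N : Int) + 1)).foldl (fun table n =>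
        (PySem.List.pyRange (2 * n) (max_h + 1)).foldl (fun table h =>
          let d := bar_chain_dim n h
          if d > 0 then table ++ [(n, h, d)] else table) table) [],
       fB (max_h) (N - 1), (Nat.factorial (N - 1) : Int)) := by
  induction N with
  | zero =>
    norm_num [PySem.List.pyRange_one_eq_nil]
  | succ N ih =>
    have hc : ((N + 1 : Nat) : Int) = (N : Int) + 1 := by push_cast; rfl
    rw [hc, PySem.List.pyRange_one_succ_right (show (1 : Int) ≤ (N : Int) + 1 by omega),
        List.foldl_append, List.foldl_append, ih, List.foldl_cons, List.foldl_cons,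
        List.foldl_nil, List.foldl_nil]
    by_cases hN : N = 0
    · subst hN
      simp only [Nat.cast_zero, Nat.zero_sub, Nat.add_sub_cancel, Nat.factorial_zero,
        Nat.cast_one]
      rw [if_neg (by norm_num : ¬ (1 : Int) < 0 + 1)]
      dsimp only
      refine Prod.ext ?_ rfl
      dsimp only
      apply PySem.List.foldl_congr_mem
      intro table h hmem
      rw [PySem.List.mem_pyRange_one] at hmem
      have hd : PySem.List.pyGetD (fB (max_h) 0) h 0 * 1
          = bar_chain_dim (0 + 1 : Int) h := by
        rw [fB_val (max_h) hH 0 h (by omega) (by omega),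
            if_pos (by norm_num; omega), mul_one,
            bar_chain_eq _ h (by norm_num) (by push_cast; omega)]
        norm_num
      rw [hd]
    · obtain ⟨k, rfl⟩ : ∃ k, N = k + 1 := ⟨N - 1, by omega⟩
      simp only [Nat.cast_add, Nat.cast_one, Nat.add_sub_cancel]
      rw [if_pos (by omega : (1 : Int) < (k : Int) + 1 + 1)]
      have hfeq : (List.map
            (fun h => (List.map (fun a =>
                PySem.List.pyGetD (sieve (max_h)) a 0 *
                  PySem.List.pyGetD (fB (max_h) k) (h - a) 0)
              (PySem.List.pyRange 2 (h + 1))).sum)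
            (PySem.List.pyRange 0 (max_h + 1))) = fB (max_h) (k + 1) := by
        rfl
      rw [hfeq]
      refine Prod.ext ?_ (Prod.ext rfl ?_)
      · try dsimp only
        apply PySem.List.foldl_congr_mem
        intro table h hmem
        rw [PySem.List.mem_pyRange_one] at hmem
        have hd : PySem.List.pyGetD (fB (max_h) (k + 1)) h 0 *
              (((k : Nat).factorial : Int) * ((k : Int) + 1 + 1 - 1))
            = bar_chain_dim ((k : Int) + 1 + 1) h := by
          rw [fB_val (max_h) hH (k + 1) h (by omega)
                (by omega),
              if_pos (by push_cast; omega),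
              bar_chain_eq _ h (by omega) (by omega)]
          have h1 : ((k : Int) + 1 + 1).toNat = k + 2 := by omega
          have h2 : ((k : Int) + 1 + 1 - 1).toNat = k + 1 := by omega
          rw [h1, h2]
          push_cast [Nat.factorial_succ]
          ring
        try dsimp only
        rw [hd]
      · try dsimp only
        push_cast [Nat.factorial_succ]
        ring

-- iterations of A's outer loop with 2*n > max_h leave the table unchanged (empty h-range)
lemma stepA_id (max_h : Int) (l : List Int) (hl : ∀ n ∈ l, max_h < 2 * n)
    (table : List (Int × Int × Int)) :
    l.foldl (fun table n =>
      (PySem.List.pyRange (2 * n) (max_h + 1)).foldl (fun table h =>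
        let d := bar_chain_dim n h
        if d > 0 then table ++ [(n, h, d)] else table) table) table = table := by
  have hcongr : ∀ (acc : List (Int × Int × Int)), ∀ n ∈ l,
      (PySem.List.pyRange (2 * n) (max_h + 1)).foldl (fun table h =>
        let d := bar_chain_dim n h
        if d > 0 then table ++ [(n, h, d)] else table) acc = acc := by
    intro acc n hn
    rw [PySem.List.pyRange_one_eq_nil (by have := hl n hn; omega), List.foldl_nil]
  rw [PySem.List.foldl_congr_mem l _ (fun acc _ => acc) table hcongr,
      PySem.List.foldl_ignore]

-- ===== VERDICT (by name: the statement is the Claim_ definition above) =====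
theorem bar_dim_table_spec : Claim_equal_bar_dim_table := by
  intro max_n max_h _
  unfold Spec_bar_dim_table
  have hfd : PySem.Int.floordiv max_h 2 = max_h / 2 :=
    PySem.Int.floordiv_eq_ediv_of_pos (by norm_num)
  by_cases hN : min max_n (PySem.Int.floordiv max_h 2) < 1
  · rw [bar_dim_table]
    simp only [bar_dim_table_alt]
    rw [if_pos hN, hfd] at *
    by_cases hmn : max_n ≤ 0
    · rw [PySem.List.pyRange_one_eq_nil (a := 1) (b := max_n + 1) (by omega)]
      rfl
    · rw [stepA_id max_h _
        (fun n hn => by rw [PySem.List.mem_pyRange_one] at hn; omega) []]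
  · rw [bar_dim_table]
    simp only [bar_dim_table_alt]
    rw [if_neg hN]
    have hH : (0 : Int) ≤ max_h := by rw [hfd] at hN; omega
    have hMnat : min max_n (PySem.Int.floordiv max_h 2)
        = (((min max_n (PySem.Int.floordiv max_h 2)).toNat : Nat) : Int) := by
      rw [hfd]; omega
    rw [PySem.List.pyRange_one_append 1 (min max_n (PySem.Int.floordiv max_h 2) + 1)
          (max_n + 1) (by rw [hfd]; omega) (by rw [hfd] at hN ⊢; omega),
        List.foldl_append,
        stepA_id max_h _
          (fun n hn => by rw [PySem.List.mem_pyRange_one, hfd] at hn; omega),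
        hMnat]
    exact (congrArg Prod.fst
      (main_fold max_h hH (min max_n (PySem.Int.floordiv max_h 2)).toNat)).symm
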